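-- pv_equiv track=rewrite | github.com/jeetjeet26/oneClick | p11-platform/services/data-engine/connectors/evaluator.py | is_brand_domain
-- ===== SOURCE A (Python) =====
-- from typing import Dict, Any, List, Optional
--
-- def normalize_domain(domain: str) -> str:
--     """Normalize domain for comparison. Handles None/empty values safely."""
--     if not domain:
--         return ''
--
--     normalized = str(domain).lower().strip()
--
--     # Remove protocol
--     normalized = normalized.replace('https://', '').replace('http://', '')
--
--     # Remove www
--     normalized = normalized.replace('www.', '', 1)
--
--     # Remove trailing slash
--     normalized = normalized.rstrip('/')
--
--     # Remove paths
--     normalized = normalized.split('/')[0]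
--
--     return normalized
--
-- def is_brand_domain(domain: str, brand_domains: List[str]) -> bool:
--     """Check if domain matches any brand domain. Handles None/empty values safely."""
--     if not domain or not brand_domains:
--         return False
--
--     normalized = normalize_domain(domain)
--     if not normalized:
--         return False
--
--     for bd in brand_domains:
--         if not bd:
--             continue
--         normalized_brand = normalize_domain(bd)
--         if not normalized_brand:
--             continue
--         if normalized == normalized_brand or normalized.endswith('.' + normalized_brand):
--             return True
--     return False
-- ===== SOURCE B (Python) =====
-- from typing import List
--
--
-- def normalize_domain(domain: str) -> str:
--     """Normalize domain for comparison. Handles None/empty values safely."""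
--     if not domain:
--         return ''
--     normalized = str(domain).lower().strip()
--     normalized = normalized.replace('https://', '').replace('http://', '')
--     normalized = normalized.replace('www.', '', 1)
--     normalized = normalized.rstrip('/')
--     normalized = normalized.split('/')[0]
--     return normalized
--
--
-- def is_brand_domain(domain: str, brand_domains: List[str]) -> bool:
--     """Check if domain matches any brand domain. Handles None/empty values safely."""
--     brands = set()
--     for bd in brand_domains or []:
--         nb = normalize_domain(bd)
--         if nb:
--             brands.add(nb)
--     d = normalize_domain(domain)
--     if d in brands:
--         return True
--     for i in range(len(d)):
--         if d[i] == '.' and d[i + 1:] in brands: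
--             return True
--     return False
-- ===== Notes on version B (the rewrite author's own statement) =====
-- stated objective: idiomatic
-- what changed: B builds one set of normalized brand domains and tests membership of the normalized domain and each of its dot-delimited suffixes, instead of A's per-brand endswith scan.
import Mathlib
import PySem

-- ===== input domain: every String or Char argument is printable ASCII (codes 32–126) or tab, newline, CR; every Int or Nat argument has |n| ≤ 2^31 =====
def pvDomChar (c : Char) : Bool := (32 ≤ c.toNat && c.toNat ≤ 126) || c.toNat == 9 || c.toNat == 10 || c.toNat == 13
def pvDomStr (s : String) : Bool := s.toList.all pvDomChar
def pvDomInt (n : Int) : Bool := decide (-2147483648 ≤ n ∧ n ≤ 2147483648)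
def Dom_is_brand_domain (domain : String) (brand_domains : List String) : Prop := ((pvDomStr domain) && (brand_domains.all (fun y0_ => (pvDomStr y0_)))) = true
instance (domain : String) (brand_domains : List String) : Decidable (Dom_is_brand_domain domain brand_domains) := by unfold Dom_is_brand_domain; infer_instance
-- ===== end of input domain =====

-- B replaces A's per-brand endswith scan by one set of normalized brands looked up at the
-- normalized domain and each of its dot-suffixes (objective: alternative/idiomatic).

-- ===== PORT A =====
-- shared helper: literal port of normalize_domain (both Pythons use the identical helper)

-- hand port of s.replace(sub, new, 1): splice 'new' at the first occurrence of 'sub'; exact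
-- (Python: count-limited replace is not a PySem primitive)
def replaceOnce (cs sub new : List Char) : List Char :=
  let i := PySem.Chars.find cs sub
  if i = -1 then cs else cs.take i.toNat ++ new ++ cs.drop (i.toNat + sub.length)

-- hand port of s.rstrip('/'): remove trailing '/' characters; exact
def rstripSlash (cs : List Char) : List Char :=
  (cs.reverse.dropWhile (fun c => c == '/')).reverse

-- normalize_domain, on the code-point list (str(domain) is the identity: domain is a str)
def normCore (domain : List Char) : List Char :=
  if domain = [] then []
  else
    let n1 := PySem.Chars.strip (PySem.Chars.lower domain)
    let n2 := PySem.Chars.replace (PySem.Chars.replace n1 "https://".toList []) "http://".toList []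
    let n3 := replaceOnce n2 "www.".toList []
    let n4 := rstripSlash n3
    (PySem.Chars.splitOn n4 ['/']).headD []   -- split('/')[0]; split('/') is never empty

-- the 'for bd in brand_domains' loop with its early 'return True' / 'continue'
def loopA (normalized : List Char) : List String → Bool
  | [] => false
  | bd :: rest =>
      if bd.toList = [] then loopA normalized rest
      else
        let nb := normCore bd.toList
        if nb = [] then loopA normalized rest
        else if normalized = nb ∨ PySem.Chars.endswith normalized ('.' :: nb) then true
        else loopA normalized rest

def is_brand_domain (domain : String) (brand_domains : List String) : Bool :=
  if domain.toList = [] ∨ brand_domains = [] then false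
  else
    let normalized := normCore domain.toList
    if normalized = [] then false
    else loopA normalized brand_domains

-- ===== PORT B =====
def brandSet (brand_domains : List String) : PySem.Set (List Char) :=
  brand_domains.foldl
    (fun s bd =>
      let nb := normCore bd.toList
      if nb = [] then s else PySem.Set.add s nb)
    PySem.Set.empty

def is_brand_domain_alt (domain : String) (brand_domains : List String) : Bool :=
  let brands := brandSet brand_domains
  let d := normCore domain.toList
  if PySem.Set.contains brands d then true
  else
    (List.range d.length).any
      (fun i => (d[i]?.getD ' ' == '.') && PySem.Set.contains brands (d.drop (i + 1)))

-- ===== PRECONDITION & SPEC =====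
def Spec_is_brand_domain (domain : String) (brand_domains : List String) (out : Bool) : Prop := out = is_brand_domain_alt domain brand_domains
instance (domain : String) (brand_domains : List String) (out : Bool) : Decidable (Spec_is_brand_domain domain brand_domains out) := by unfold Spec_is_brand_domain; infer_instance

-- ===== CLAIM (what is proved, stated in full; the proofs are below) =====
def Claim_equal_is_brand_domain : Prop := ∀ (domain : String) (brand_domains : List String), Dom_is_brand_domain domain brand_domains → Spec_is_brand_domain domain brand_domains (is_brand_domain domain brand_domains)

-- ===== LEMMAS AND PROOFS =====

-- membership in the brand set = some brand normalizes (non-emptily) to x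
lemma mem_brandSet_fold (bds : List String) (s : PySem.Set (List Char)) (x : List Char) :
    x ∈ bds.foldl
        (fun s bd =>
          let nb := normCore bd.toList
          if nb = [] then s else PySem.Set.add s nb) s
      ↔ x ∈ s ∨ ∃ bd ∈ bds, normCore bd.toList = x ∧ normCore bd.toList ≠ [] := by
  induction bds generalizing s with
  | nil => simp
  | cons bd rest ih =>
      simp only [List.foldl_cons]
      rw [ih]
      by_cases h : normCore bd.toList = [] <;>
        simp [h, PySem.Set.mem_add] <;> aesop

lemma mem_brandSet (bds : List String) (x : List Char) :
    x ∈ brandSet bds ↔ ∃ bd ∈ bds, normCore bd.toList = x ∧ normCore bd.toList ≠ [] := by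
  unfold brandSet
  rw [mem_brandSet_fold]
  simp [PySem.Set.empty]

lemma contains_brandSet (bds : List String) (x : List Char) :
    PySem.Set.contains (brandSet bds) x = true
      ↔ ∃ bd ∈ bds, normCore bd.toList = x ∧ normCore bd.toList ≠ [] := by
  rw [← mem_brandSet]
  simp [PySem.Set.contains]

-- a dotted suffix is exactly a suffix cut right after a '.'
lemma dot_suffix_iff (n nb : List Char) :
    ('.' :: nb) <:+ n ↔ ∃ i < n.length, n[i]? = some '.' ∧ n.drop (i + 1) = nb := by
  constructor
  · rintro ⟨t, rfl⟩
    refine ⟨t.length, by simp, ?_, ?_⟩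
    · simp
    · simp [List.drop_append]
  · rintro ⟨i, hi, hget, hdrop⟩
    refine ⟨n.take i, ?_⟩
    have h1 : n.drop i = '.' :: nb := by
      have := List.getElem?_eq_some_iff.mp hget
      obtain ⟨hlt, hval⟩ := this
      have : n.drop i = n[i] :: n.drop (i + 1) := List.drop_eq_getElem_cons hlt
      rw [this, hval, hdrop]
    calc n.take i ++ '.' :: nb = n.take i ++ n.drop i := by rw [h1]
      _ = n := List.take_append_drop i n

-- A's loop is an existence test
lemma loopA_iff (n : List Char) (bds : List String) :
    loopA n bds = true
      ↔ ∃ bd ∈ bds, normCore bd.toList ≠ []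
          ∧ (n = normCore bd.toList ∨ PySem.Chars.endswith n ('.' :: normCore bd.toList) = true) := by
  induction bds with
  | nil => simp [loopA]
  | cons bd rest ih =>
      by_cases h0 : bd.toList = []
      · simp [loopA, h0, ih, show normCore ([] : List Char) = [] from rfl]
      · by_cases h1 : normCore bd.toList = []
        · simp [loopA, h0, h1, ih]
        · by_cases h2 : n = normCore bd.toList ∨ PySem.Chars.endswith n ('.' :: normCore bd.toList) = true
          · simp only [loopA, if_neg h0, if_neg h1, if_pos h2]
            simp only [true_iff]
            exact ⟨bd, List.mem_cons_self, h1, h2⟩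
          · simp [loopA, h0, h1, h2, ih]

-- B as an existence test
lemma alt_iff (domain : String) (bds : List String) :
    is_brand_domain_alt domain bds = true
      ↔ ∃ bd ∈ bds, normCore bd.toList ≠ []
          ∧ (normCore domain.toList = normCore bd.toList
             ∨ PySem.Chars.endswith (normCore domain.toList) ('.' :: normCore bd.toList) = true) := by
  unfold is_brand_domain_alt
  set n := normCore domain.toList with hn
  by_cases hc : PySem.Set.contains (brandSet bds) n = true
  · rw [if_pos hc]
    obtain ⟨bd, hbd, heq, hne⟩ := (contains_brandSet bds n).mp hc
    simp only [true_iff]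
    exact ⟨bd, hbd, hne, Or.inl heq.symm⟩
  · rw [if_neg hc]
    have hnotself : ¬ ∃ bd ∈ bds, normCore bd.toList = n ∧ normCore bd.toList ≠ [] := by
      rw [← contains_brandSet]; exact hc
    constructor
    · intro hany
      obtain ⟨i, hi, hcond⟩ := List.any_eq_true.mp hany
      have hilt : i < n.length := List.mem_range.mp hi
      simp only [Bool.and_eq_true, beq_iff_eq] at hcond
      obtain ⟨hdot, hmem⟩ := hcond
      obtain ⟨bd, hbd, heq, hne⟩ := (contains_brandSet bds _).mp hmem
      refine ⟨bd, hbd, hne, Or.inr ?_⟩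
      rw [PySem.Chars.endswith_iff, dot_suffix_iff]
      refine ⟨i, hilt, ?_, heq.symm⟩
      simpa [List.getElem?_eq_getElem hilt] using hdot
    · rintro ⟨bd, hbd, hne, hmatch⟩
      rcases hmatch with heq | hsuf
      · exact absurd ⟨bd, hbd, heq.symm, hne⟩ hnotself
      · rw [PySem.Chars.endswith_iff, dot_suffix_iff] at hsuf
        obtain ⟨i, hilt, hdot, hdrop⟩ := hsuf
        refine List.any_eq_true.mpr ⟨i, List.mem_range.mpr hilt, ?_⟩
        simp only [Bool.and_eq_true, beq_iff_eq]
        exact ⟨by simp [hdot], (contains_brandSet bds _).mpr ⟨bd, hbd, hdrop.symm, hne⟩⟩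

-- ===== VERDICT (by name: the statement is the Claim_ definition above) =====
theorem is_brand_domain_spec : Claim_equal_is_brand_domain := by
  intro domain bds _
  unfold Spec_is_brand_domain
  unfold is_brand_domain
  by_cases hg : domain.toList = [] ∨ bds = []
  · rw [if_pos hg]
    symm
    rw [← Bool.not_eq_true, alt_iff]
    rintro ⟨bd, hbd, hne, hmatch⟩
    rcases hg with hd | hb
    · have hn : normCore domain.toList = [] := by rw [hd]; simp [normCore]
      rcases hmatch with heq | hsuf
      · exact hne (heq.symm.trans hn)
      · rw [PySem.Chars.endswith_iff, hn] at hsuf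
        exact absurd (List.suffix_nil.mp hsuf) (by simp)
    · subst hb; exact absurd hbd (List.not_mem_nil)
  · rw [if_neg hg]
    by_cases hn : normCore domain.toList = []
    · rw [if_pos hn]
      symm
      rw [← Bool.not_eq_true, alt_iff]
      rintro ⟨bd, hbd, hne, hmatch⟩
      rcases hmatch with heq | hsuf
      · exact hne (heq.symm.trans hn)
      · rw [PySem.Chars.endswith_iff, hn] at hsuf
        exact absurd (List.suffix_nil.mp hsuf) (by simp)
    · rw [if_neg hn]
      cases h : loopA (normCore domain.toList) bds with
      | true => symm; rw [alt_iff]; exact (loopA_iff _ bds).mp h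
      | false =>
          symm
          rw [← Bool.not_eq_true, alt_iff]
          intro hx
          have := (loopA_iff _ bds).mpr hx
          rw [h] at this
          exact Bool.false_ne_true this
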